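-- pv_equiv track=rewrite | github.com/rsliu-225/wrs | 0002_rs/bendplanner/_tst_premutation.py | pnp_cnt
-- ===== SOURCE A (Python) =====
-- def intersection(lst1, lst2):
--     lst3 = [value for value in lst1 if value in lst2]
--     return lst3
--
-- def pnp_cnt(l):
--     cnt = 0
--     for i in range(len(l) - 1):
--         if l[i + 1] < l[i]:
--             cnt += 1
--         elif len(intersection(l[:i], range(l[i], l[i + 1]))) > 0:
--             cnt += 1
--     return cnt
-- ===== SOURCE B (Python) =====
-- def _bisect_left(xs, x):
--     lo, hi = 0, len(xs)
--     while lo < hi: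
--         mid = (lo + hi) // 2
--         if xs[mid] < x:
--             lo = mid + 1
--         else:
--             hi = mid
--     return lo
--
--
-- def pnp_cnt(l):
--     cnt = 0
--     seen = []  # sorted copy of the prefix l[:k]
--     for k in range(len(l) - 1):
--         a, b = l[k], l[k + 1]
--         j = _bisect_left(seen, a)
--         if b < a:
--             cnt += 1
--         elif j < len(seen) and seen[j] < b:
--             cnt += 1
--         seen.insert(j, a)
--     return cnt
-- ===== Notes on version B (the rewrite author's own statement) =====
-- stated objective: faster
-- what changed: Instead of re-scanning (and slicing) the whole prefix l[:i] for an element in [l[i], l[i+1]) at every step, B maintains one sorted list of the values seen so far and answers each interval-existence query with a binary search, inserting the new value at its search position.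
import Mathlib
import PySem

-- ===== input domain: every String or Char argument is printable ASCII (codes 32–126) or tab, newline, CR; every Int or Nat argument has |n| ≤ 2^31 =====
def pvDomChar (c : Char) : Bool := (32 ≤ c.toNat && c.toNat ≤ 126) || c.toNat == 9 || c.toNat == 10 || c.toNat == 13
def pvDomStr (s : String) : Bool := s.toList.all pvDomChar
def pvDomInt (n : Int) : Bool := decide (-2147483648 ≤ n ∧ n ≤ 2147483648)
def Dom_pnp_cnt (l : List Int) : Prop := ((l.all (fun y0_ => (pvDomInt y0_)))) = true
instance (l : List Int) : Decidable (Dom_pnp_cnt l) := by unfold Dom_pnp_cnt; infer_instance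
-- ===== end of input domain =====

-- B replaces A's per-step scan of the whole prefix (and its l[:i] slice copies) by one sorted
-- list of seen values queried with a hand-written binary search per step (objective: faster).


-- ===== PORT A =====
-- intersection(lst1, range(a, b)): Python's `value in range(a, b)` is the exact O(1)
-- int membership test a ≤ value < b, so the range argument is ported as its two bounds.
def intersectionRange (lst1 : List Int) (a b : Int) : List Int :=
  lst1.filter (fun value => decide (a ≤ value) && decide (value < b))

def pnp_cnt (l : List Int) : Int :=
  (PySem.List.pyRange 0 (PySem.List.len l - 1) 1).foldl
    (fun cnt i =>
      if PySem.List.pyGetD l (i + 1) 0 < PySem.List.pyGetD l i 0 then cnt + 1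
      else if 0 < PySem.List.len (intersectionRange (PySem.List.slice l (some 0) (some i))
                    (PySem.List.pyGetD l i 0) (PySem.List.pyGetD l (i + 1) 0)) then cnt + 1
      else cnt) 0

-- ===== PORT B =====
-- hand-written while-loop binary search from Source B (lo, hi are nonnegative Python ints → Nat;
-- (lo + hi) // 2 on nonnegative ints is exactly Nat division)
def bisectLeftLoop (xs : List Int) (x : Int) (lo hi : Nat) : Nat :=
  if _h : lo < hi then
    let mid := (lo + hi) / 2
    if PySem.List.pyGetD xs (mid : Int) 0 < x then bisectLeftLoop xs x (mid + 1) hi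
    else bisectLeftLoop xs x lo mid
  else lo
termination_by hi - lo
decreasing_by all_goals omega

def bisectLeft' (xs : List Int) (x : Int) : Nat := bisectLeftLoop xs x 0 xs.length

def pnp_cnt_alt (l : List Int) : Int :=
  (((PySem.List.pyRange 0 (PySem.List.len l - 1) 1).foldl
    (fun st k =>
      let a := PySem.List.pyGetD l k 0
      let b := PySem.List.pyGetD l (k + 1) 0
      let j := bisectLeft' st.2 a
      ((if b < a then st.1 + 1
        else if j < st.2.length ∧ PySem.List.pyGetD st.2 (j : Int) 0 < b then st.1 + 1
        else st.1),
       PySem.List.insert st.2 (j : Int) a))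
    ((0 : Int), ([] : List Int))) : Int × List Int).1

-- ===== PRECONDITION & SPEC =====
def Spec_pnp_cnt (l : List Int) (out : Int) : Prop := out = pnp_cnt_alt l
instance (l : List Int) (out : Int) : Decidable (Spec_pnp_cnt l out) := by unfold Spec_pnp_cnt; infer_instance

-- ===== CLAIM (what is proved, stated in full; the proofs are below) =====
def Claim_equal_pnp_cnt : Prop := ∀ (l : List Int), Dom_pnp_cnt l → Spec_pnp_cnt l (pnp_cnt l)

-- ===== LEMMAS AND PROOFS =====
theorem getD_mono_of_pairwise {xs : List Int} (h : xs.Pairwise (· ≤ ·))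
    {i j : Nat} (hij : i ≤ j) (hj : j < xs.length) : xs.getD i 0 ≤ xs.getD j 0 := by
  rcases eq_or_lt_of_le hij with rfl | hlt
  · rfl
  · rw [List.getD_eq_getElem _ _ (lt_of_le_of_lt hij hj), List.getD_eq_getElem _ _ hj]
    exact (List.pairwise_iff_getElem.mp h) i j _ hj hlt

theorem bisectLeftLoop_le (xs : List Int) (x : Int) :
    ∀ (n lo hi : Nat), hi - lo ≤ n → lo ≤ hi → bisectLeftLoop xs x lo hi ≤ hi := by
  intro n
  induction n with
  | zero => intro lo hi h1 h2; rw [bisectLeftLoop]; simp [show ¬ lo < hi by omega]; omega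
  | succ n ih =>
    intro lo hi h1 h2
    rw [bisectLeftLoop]
    split
    · dsimp only
      split
      · exact le_trans (ih _ _ (by omega) (by omega)) le_rfl
      · exact le_trans (ih _ _ (by omega) (by omega)) (by omega)
    · omega

theorem bisectLeftLoop_spec (xs : List Int) (x : Int) (hs : xs.Pairwise (· ≤ ·)) :
    ∀ (n lo hi : Nat), hi - lo ≤ n → lo ≤ hi → hi ≤ xs.length →
    (∀ i, i < lo → xs.getD i 0 < x) →
    (∀ i, hi ≤ i → i < xs.length → ¬ xs.getD i 0 < x) →
    (∀ i, i < bisectLeftLoop xs x lo hi → xs.getD i 0 < x) ∧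
    bisectLeftLoop xs x lo hi ≤ xs.length ∧
    (∀ i, bisectLeftLoop xs x lo hi ≤ i → i < xs.length → ¬ xs.getD i 0 < x) := by
  intro n
  induction n with
  | zero =>
    intro lo hi h1 h2 h3 h4 h5
    rw [bisectLeftLoop]
    simp only [show ¬ lo < hi by omega, dif_neg, not_false_iff]
    exact ⟨h4, by omega, fun i hge hlen => h5 i (by omega) hlen⟩
  | succ n ih =>
    intro lo hi h1 h2 h3 h4 h5
    rw [bisectLeftLoop]
    split
    case isFalse h =>
      exact ⟨h4, by omega, fun i hge hlen => h5 i (by omega) hlen⟩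
    case isTrue h =>
      simp only [PySem.List.pyGetD_natCast]
      split
      case isTrue hm =>
        refine ih ((lo+hi)/2 + 1) hi (by omega) (by omega) h3 ?_ h5
        intro i hi2
        exact lt_of_le_of_lt (getD_mono_of_pairwise hs (by omega) (by omega)) hm
      case isFalse hm =>
        refine ih lo ((lo+hi)/2) (by omega) (by omega) (by omega) h4 ?_
        intro i hge hilen hcon
        exact hm (lt_of_le_of_lt (getD_mono_of_pairwise hs hge hilen) hcon)


theorem bisectLeft'_spec (xs : List Int) (x : Int) (hs : xs.Pairwise (· ≤ ·)) :
    (∀ i, i < bisectLeft' xs x → xs.getD i 0 < x) ∧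
    bisectLeft' xs x ≤ xs.length ∧
    (∀ i, bisectLeft' xs x ≤ i → i < xs.length → ¬ xs.getD i 0 < x) :=
  bisectLeftLoop_spec xs x hs xs.length 0 xs.length (by omega) (by omega) le_rfl
    (fun i hi => absurd hi (Nat.not_lt_zero i)) (fun i hi hlen => absurd hi (by omega))

theorem bisectLeft'_le (xs : List Int) (x : Int) : bisectLeft' xs x ≤ xs.length :=
  bisectLeftLoop_le xs x xs.length 0 xs.length (by omega) (by omega)

theorem bisect_query (seen : List Int) (a b : Int) (hs : seen.Pairwise (· ≤ ·)) :
    ((bisectLeft' seen a < seen.length ∧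
      PySem.List.pyGetD seen ((bisectLeft' seen a : Nat) : Int) 0 < b)
     ↔ ∃ v ∈ seen, a ≤ v ∧ v < b) := by
  obtain ⟨h1, h2, h3⟩ := bisectLeft'_spec seen a hs
  set j := bisectLeft' seen a with hj
  simp only [PySem.List.pyGetD_natCast]
  constructor
  · rintro ⟨hlt, hb⟩
    refine ⟨seen.getD j 0, ?_, not_lt.mp (h3 j le_rfl hlt), hb⟩
    rw [List.getD_eq_getElem _ _ hlt]; exact List.getElem_mem hlt
  · rintro ⟨v, hv, hav, hvb⟩
    obtain ⟨i, hilen, rfl⟩ := List.mem_iff_getElem.mp hv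
    have hij : j ≤ i := by
      by_contra hc
      have := h1 i (by omega)
      rw [List.getD_eq_getElem _ _ hilen] at this
      omega
    refine ⟨by omega, ?_⟩
    calc seen.getD j 0 ≤ seen.getD i 0 := getD_mono_of_pairwise hs hij hilen
      _ < b := by rw [List.getD_eq_getElem _ _ hilen]; exact hvb

theorem insert_bisect_perm (seen : List Int) (x : Int) :
    (PySem.List.insert seen ((bisectLeft' seen x : Nat) : Int) x).Perm (x :: seen) := by
  rw [PySem.List.insert_natCast seen _ x (bisectLeft'_le seen x)]
  calc (seen.take _ ++ x :: seen.drop _).Perm (x :: (seen.take _ ++ seen.drop _)) := List.perm_middle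
    _ = (x :: seen) := by rw [List.take_append_drop]

theorem insert_bisect_sorted (seen : List Int) (x : Int) (hs : seen.Pairwise (· ≤ ·)) :
    (PySem.List.insert seen ((bisectLeft' seen x : Nat) : Int) x).Pairwise (· ≤ ·) := by
  obtain ⟨h1, h2, h3⟩ := bisectLeft'_spec seen x hs
  set j := bisectLeft' seen x with hj
  rw [PySem.List.insert_natCast seen _ x h2]
  have htake : ∀ u ∈ seen.take j, u < x := by
    intro u hu
    obtain ⟨i, hilen, rfl⟩ := List.mem_iff_getElem.mp hu
    rw [List.getElem_take]
    have hi' : i < j := by simpa using (List.length_take_le j seen).trans_lt' hilen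
    have := h1 i hi'
    rwa [List.getD_eq_getElem _ _ (by omega)] at this
  have hdrop : ∀ u ∈ seen.drop j, x ≤ u := by
    intro u hu
    obtain ⟨i, hilen, rfl⟩ := List.mem_iff_getElem.mp hu
    rw [List.getElem_drop]
    have := h3 (j + i) (by omega) (by simp at hilen ⊢; omega)
    rwa [List.getD_eq_getElem _ _ (by simp at hilen ⊢; omega), not_lt] at this
  refine List.pairwise_append.mpr ⟨hs.sublist (List.take_sublist _ _), ?_, ?_⟩
  · exact List.pairwise_cons.mpr ⟨hdrop, hs.sublist (List.drop_sublist _ _)⟩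
  · intro u hu y hy
    rcases List.mem_cons.mp hy with rfl | hy'
    · exact (htake u hu).le
    · exact (htake u hu).le.trans (hdrop y hy')


theorem main_invariant (l : List Int) : ∀ (m : Nat), m + 1 ≤ l.length →
    ((PySem.List.pyRange 0 (m : Int) 1).foldl
      (fun cnt i =>
        if PySem.List.pyGetD l (i + 1) 0 < PySem.List.pyGetD l i 0 then cnt + 1
        else if 0 < PySem.List.len (intersectionRange (PySem.List.slice l (some 0) (some i))
                      (PySem.List.pyGetD l i 0) (PySem.List.pyGetD l (i + 1) 0)) then cnt + 1
        else cnt) (0 : Int)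
     = ((PySem.List.pyRange 0 (m : Int) 1).foldl
        (fun st k =>
          let a := PySem.List.pyGetD l k 0
          let b := PySem.List.pyGetD l (k + 1) 0
          let j := bisectLeft' st.2 a
          ((if b < a then st.1 + 1
            else if j < st.2.length ∧ PySem.List.pyGetD st.2 (j : Int) 0 < b then st.1 + 1
            else st.1),
           PySem.List.insert st.2 (j : Int) a))
        ((0 : Int), ([] : List Int))).1)
    ∧ ((PySem.List.pyRange 0 (m : Int) 1).foldl
        (fun st k =>
          let a := PySem.List.pyGetD l k 0
          let b := PySem.List.pyGetD l (k + 1) 0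
          let j := bisectLeft' st.2 a
          ((if b < a then st.1 + 1
            else if j < st.2.length ∧ PySem.List.pyGetD st.2 (j : Int) 0 < b then st.1 + 1
            else st.1),
           PySem.List.insert st.2 (j : Int) a))
        ((0 : Int), ([] : List Int))).2.Perm (l.take m)
    ∧ ((PySem.List.pyRange 0 (m : Int) 1).foldl
        (fun st k =>
          let a := PySem.List.pyGetD l k 0
          let b := PySem.List.pyGetD l (k + 1) 0
          let j := bisectLeft' st.2 a
          ((if b < a then st.1 + 1
            else if j < st.2.length ∧ PySem.List.pyGetD st.2 (j : Int) 0 < b then st.1 + 1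
            else st.1),
           PySem.List.insert st.2 (j : Int) a))
        ((0 : Int), ([] : List Int))).2.Pairwise (· ≤ ·) := by
  intro m
  induction m with
  | zero =>
    intro _
    simp [PySem.List.pyRange_one_eq_nil]
  | succ m ih =>
    intro hm
    obtain ⟨ihc, ihp, ihs⟩ := ih (by omega)
    rw [show ((m + 1 : Nat) : Int) = (m : Int) + 1 by push_cast; ring,
        PySem.List.pyRange_one_succ_right (show (0:Int) ≤ (m:Int) by positivity)]
    simp only [List.foldl_append, List.foldl_cons, List.foldl_nil]
    rw [← ihc]
    set cA := (PySem.List.pyRange 0 (m : Int) 1).foldl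
      (fun cnt i =>
        if PySem.List.pyGetD l (i + 1) 0 < PySem.List.pyGetD l i 0 then cnt + 1
        else if 0 < PySem.List.len (intersectionRange (PySem.List.slice l (some 0) (some i))
                      (PySem.List.pyGetD l i 0) (PySem.List.pyGetD l (i + 1) 0)) then cnt + 1
        else cnt) 0 with hcA
    set stB := (PySem.List.pyRange 0 (m : Int) 1).foldl
        (fun st k =>
          let a := PySem.List.pyGetD l k 0
          let b := PySem.List.pyGetD l (k + 1) 0
          let j := bisectLeft' st.2 a
          ((if b < a then st.1 + 1
            else if j < st.2.length ∧ PySem.List.pyGetD st.2 (j : Int) 0 < b then st.1 + 1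
            else st.1),
           PySem.List.insert st.2 (j : Int) a))
        ((0 : Int), ([] : List Int)) with hstB
  -- a, b as getD
    have hmlen : m < l.length := by omega
    have ha : PySem.List.pyGetD l (m : Int) 0 = l.getD m 0 := by
      simp [PySem.List.pyGetD_natCast]
    have hb : PySem.List.pyGetD l ((m : Int) + 1) 0 = l.getD (m + 1) 0 := by
      rw [show ((m : Int) + 1) = ((m + 1 : Nat) : Int) by push_cast; ring,
        PySem.List.pyGetD_natCast]
    have hslice : PySem.List.slice l (some 0) (some (m : Int)) = l.take m := by
      simp [PySem.List.slice_zero_start, PySem.List.slice_to_natCast]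
    -- the two elif conditions agree
    have hcond : (0 < PySem.List.len (intersectionRange (l.take m) (l.getD m 0) (l.getD (m+1) 0)))
        ↔ (bisectLeft' stB.2 (l.getD m 0) < stB.2.length ∧
           PySem.List.pyGetD stB.2 ((bisectLeft' stB.2 (l.getD m 0) : Nat) : Int) 0 < l.getD (m+1) 0) := by
      rw [bisect_query stB.2 _ _ ihs]
      simp only [intersectionRange, PySem.List.len_eq]
      rw [show ∀ n : Nat, ((0:Int) < (n:Int)) ↔ 0 < n from fun n => by exact_mod_cast Iff.rfl]
      rw [show (∃ v ∈ stB.2, l.getD m 0 ≤ v ∧ v < l.getD (m+1) 0)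
            ↔ (∃ v ∈ l.take m, l.getD m 0 ≤ v ∧ v < l.getD (m+1) 0) from by
          constructor <;> rintro ⟨v, hv, h⟩
          · exact ⟨v, ihp.mem_iff.mp hv, h⟩
          · exact ⟨v, ihp.mem_iff.mpr hv, h⟩]
      simp [List.length_pos_iff, List.filter_eq_nil_iff]
    refine ⟨?_, ?_, ?_⟩
    · -- counts agree after the extra step
      simp only [ha, hb, hslice, hcond]
    · -- permutation invariant
      have hperm := insert_bisect_perm stB.2 (PySem.List.pyGetD l (m : Int) 0)
      refine hperm.trans ?_
      have htake : l.take (m + 1) = l.take m ++ [l.getD m 0] := by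
        rw [List.take_add_one, List.getElem?_eq_getElem hmlen,
          List.getD_eq_getElem _ _ hmlen, Option.toList_some]
      rw [ha, htake]
      exact (List.Perm.cons _ ihp).trans
        (by simpa using (List.perm_middle (a := l.getD m 0) (l₁ := l.take m) (l₂ := [])).symm)
    · exact insert_bisect_sorted stB.2 _ ihs

-- ===== VERDICT (by name: the statement is the Claim_ definition above) =====
theorem pnp_cnt_spec : Claim_equal_pnp_cnt := by
  intro l _
  unfold Spec_pnp_cnt pnp_cnt pnp_cnt_alt
  rcases l with _ | ⟨x, xs⟩
  · rfl
  · rw [show PySem.List.len (x :: xs) - 1 = (((x :: xs).length - 1 : Nat) : Int) by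
      simp [PySem.List.len_eq]]
    exact (main_invariant (x :: xs) ((x :: xs).length - 1) (by simp)).1
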